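-- pv_equiv track=rewrite | github.com/tsunrise/sumcheck_multilinear | multilinear_extension.py | evaluate_sparse
-- ===== SOURCE A (Python) =====
-- from typing import List, Dict
--
-- def evaluate_sparse(data: Dict[int, int], arguments: List[int], fieldSize: int) -> int:
--     """
--     Sparse version of the function evaluate. The function also takes linear time to the size of data.
--     :param data: dictionary indicating a map between binary argument and its value (sparse bookkeeping table)
--     :param arguments: Input argument
--     :param fieldSize:
--     :return:
--     """
--     L = len(arguments)
--     p = fieldSize
--
--     dp0 = data.copy()
--     dp1: Dict[int, int] = dict()
--     for i in range(L):
--         r = arguments[i]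
--         for k, v in dp0.items():
--             if k >> 1 not in dp1:
--                 dp1[k >> 1] = 0
--             if k & 1 == 0:
--                 dp1[k >> 1] = (dp1[k >> 1] + dp0[k] * (1 - r)) % p
--             else:
--                 dp1[k >> 1] = (dp1[k >> 1] + dp0[k] * r) % p
--         dp0 = dp1
--         dp1 = dict()
--     if 0 not in dp0:
--         return 0
--     return dp0[0]
-- ===== SOURCE B (Python) =====
-- from typing import List, Dict
--
-- def evaluate_sparse(data: Dict[int, int], arguments: List[int], fieldSize: int) -> int:
--     """Direct evaluation: one weighted term per entry, with a shared suffix product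
--     of (1 - arguments[i]) factors for the high zero bits; no dp table."""
--     L = len(arguments)
--     if not data:
--         return 0
--     if L == 0:
--         return data.get(0, 0)
--     # suffix[m] = prod of (1 - arguments[i]) for i in range(L-m, L), mod fieldSize
--     suffix = [1]
--     s = 1
--     for m in range(L):
--         s = s * (1 - arguments[L - 1 - m]) % fieldSize
--         suffix.append(s)
--     acc = 0
--     for k, v in data.items():
--         if (k >> L) != 0:
--             continue
--         b = k.bit_length()
--         term = v
--         for i in range(b):
--             term = term * (arguments[i] if (k >> i) & 1 else (1 - arguments[i])) % fieldSize
--         acc += term * suffix[L - b]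
--     return acc % fieldSize
-- ===== Notes on version B (the rewrite author's own statement) =====
-- stated objective: alternative
-- what changed: Replaced the L-round dp-dictionary halving loop by a direct single pass over the entries: each key with k >> L == 0 contributes value times the product of (arguments[i] if bit i else 1-arguments[i]) reduced mod fieldSize, with a shared precomputed suffix product covering the high zero bits; the L==0 and empty-data cases are returned directly, as A does.
import Mathlib
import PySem

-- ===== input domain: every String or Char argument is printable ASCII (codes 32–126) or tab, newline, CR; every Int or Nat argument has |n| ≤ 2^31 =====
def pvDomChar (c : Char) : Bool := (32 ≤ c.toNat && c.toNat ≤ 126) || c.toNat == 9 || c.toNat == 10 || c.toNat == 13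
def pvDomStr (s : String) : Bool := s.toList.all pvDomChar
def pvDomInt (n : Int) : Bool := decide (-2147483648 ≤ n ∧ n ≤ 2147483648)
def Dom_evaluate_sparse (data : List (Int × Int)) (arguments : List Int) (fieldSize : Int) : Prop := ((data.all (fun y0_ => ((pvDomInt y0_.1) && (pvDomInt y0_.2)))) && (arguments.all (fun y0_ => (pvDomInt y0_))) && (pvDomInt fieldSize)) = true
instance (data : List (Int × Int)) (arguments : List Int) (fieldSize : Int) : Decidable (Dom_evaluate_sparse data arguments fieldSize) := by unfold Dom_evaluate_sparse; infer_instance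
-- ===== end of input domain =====

-- B replaces A's per-round dp dictionaries by one direct weighted-product pass over the entries (with a shared suffix product for the high zero bits of each key); objective: alternative.

-- ===== PORT A =====
-- body of A's inner loop over dp0.items(): conditional key init, then accumulate with % p
def pvStepInner (p r : Int) (dcur acc : PySem.Dict Int Int) (kv : Int × Int) : PySem.Dict Int Int :=
  let key := kv.1 >>> (1 : Nat)
  let acc1 := if acc.contains key then acc else acc.insert key 0
  if PySem.Int.band kv.1 1 == 0 then
    acc1.insert key (PySem.Int.mod (acc1.getD key 0 + dcur.getD kv.1 0 * (1 - r)) p)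
  else
    acc1.insert key (PySem.Int.mod (acc1.getD key 0 + dcur.getD kv.1 0 * r) p)

-- one iteration of A's outer `for i in range(L)` loop: dp1 built from dp0, starting from an empty dict
def pvRoundA (p r : Int) (d : PySem.Dict Int Int) : PySem.Dict Int Int :=
  d.items.foldl (pvStepInner p r d) PySem.Dict.empty

def evaluate_sparse (data : List (Int × Int)) (arguments : List Int) (fieldSize : Int) : Int :=
  let L := arguments.length
  let p := fieldSize
  let dp0 := PySem.Dict.ofList data
  let dpF := (List.range L).foldl (fun dp i => pvRoundA p (arguments.getD i 0) dp) dp0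
  match dpF.get? 0 with
  | none => 0
  | some v => v

-- ===== PORT B =====
-- body of B's suffix-product loop: s = s * (1 - arguments[L-1-m]) % fieldSize; suffix.append(s)
def pvSuffixStep (args : List Int) (p : Int) (L : Nat) (st : List Int × Int) (m : Nat) : List Int × Int :=
  let s := PySem.Int.mod (st.2 * (1 - args.getD (L - 1 - m) 0)) p
  (st.1 ++ [s], s)

def evaluate_sparse_alt (data : List (Int × Int)) (arguments : List Int) (fieldSize : Int) : Int :=
  let L := arguments.length
  let d := PySem.Dict.ofList data
  if data.isEmpty then 0
  else if L = 0 then d.getD 0 0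
  else
    let suffix := ((List.range L).foldl (pvSuffixStep arguments fieldSize L) ([1], 1)).1
    PySem.Int.mod
      (d.items.foldl (fun (acc : Int) (kv : Int × Int) =>
        if kv.1 >>> L ≠ 0 then acc
        else
          let b := PySem.Int.bitLength kv.1
          acc + ((List.range b).foldl
            (fun (term : Int) (i : Nat) => PySem.Int.mod (term * (if PySem.Int.band (kv.1 >>> i) 1 != 0 then arguments.getD i 0 else 1 - arguments.getD i 0)) fieldSize)
            kv.2) * suffix.getD (L - b) 0) 0)
      fieldSize

-- ===== PRECONDITION & SPEC =====
-- Pre_ excludes exactly the inputs where Python A raises ZeroDivisionError: fieldSize = 0 with a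
-- nonempty argument list and nonempty data (the `% p` in the loop body is then evaluated).
def Pre_evaluate_sparse (data : List (Int × Int)) (arguments : List Int) (fieldSize : Int) : Prop :=
  fieldSize ≠ 0 ∨ arguments = [] ∨ data = []
instance (data : List (Int × Int)) (arguments : List Int) (fieldSize : Int) : Decidable (Pre_evaluate_sparse data arguments fieldSize) := by unfold Pre_evaluate_sparse; infer_instance

def pvWitness_evaluate_sparse : (List (Int × Int)) × List Int × Int := ([(1, 3), (0, 2)], [5], 7)

def Spec_evaluate_sparse (data : List (Int × Int)) (arguments : List Int) (fieldSize : Int) (out : Int) : Prop := out = evaluate_sparse_alt data arguments fieldSize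
instance (data : List (Int × Int)) (arguments : List Int) (fieldSize : Int) (out : Int) : Decidable (Spec_evaluate_sparse data arguments fieldSize out) := by unfold Spec_evaluate_sparse; infer_instance

-- ===== CLAIM (what is proved, stated in full; the proofs are below) =====
def Claim_equal_evaluate_sparse : Prop := ∀ (data : List (Int × Int)) (arguments : List Int) (fieldSize : Int), Dom_evaluate_sparse data arguments fieldSize → Pre_evaluate_sparse data arguments fieldSize → Spec_evaluate_sparse data arguments fieldSize (evaluate_sparse data arguments fieldSize)

-- ===== LEMMAS AND PROOFS =====

-- the branch factor of A's round with argument r, applied to a (shifted) key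
def pvG (r k : Int) : Int := if PySem.Int.band k 1 == 0 then 1 - r else r

-- product of the first t branch factors of a key
def pvW (args : List Int) (t : Nat) (k : Int) : Int :=
  ((List.range t).map (fun i => pvG (args.getD i 0) (k >>> i))).prod

-- total weighted contribution, at level t, of all entries whose t-shifted key is j
def pvV (items : List (Int × Int)) (args : List Int) (t : Nat) (j : Int) : Int :=
  (items.map (fun (kv : Int × Int) => if kv.1 >>> t = j then kv.2 * pvW args t kv.1 else 0)).sum

-- pvStepInner with the dp0-lookup resolved and the two branches merged
def pvStepI (p r : Int) (acc : PySem.Dict Int Int) (kv : Int × Int) : PySem.Dict Int Int :=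
  acc.insert (kv.1 >>> (1 : Nat)) (PySem.Int.mod (acc.getD (kv.1 >>> (1 : Nat)) 0 + kv.2 * pvG r kv.1) p)

lemma pv_shr_shr (k : Int) (t : Nat) : k >>> t >>> (1 : Nat) = k >>> (t + 1) := by
  rw [Int.shiftRight_eq_div_pow, Int.shiftRight_eq_div_pow, Int.shiftRight_eq_div_pow]
  rw [Int.ediv_ediv_of_nonneg (by positivity)]
  congr 1

lemma pv_shr_zero (k : Int) : k >>> (0 : Nat) = k := by
  rw [Int.shiftRight_eq_div_pow]; simp

lemma pvmod_idem (a p : Int) : PySem.Int.mod (PySem.Int.mod a p) p = PySem.Int.mod a p :=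
  Int.fmod_fmod_of_dvd a dvd_rfl

lemma pvdvd_mod_sub (a p : Int) : p ∣ (PySem.Int.mod a p - a) := by
  refine ⟨-(a.fdiv p), ?_⟩
  have h := Int.fmod_add_mul_fdiv a p
  show Int.fmod a p - a = _
  linarith

lemma pvmod_congr {p a b : Int} (h : p ∣ a - b) : PySem.Int.mod a p = PySem.Int.mod b p := by
  obtain ⟨q, hq⟩ := h
  have : a = b + p * q := by linarith
  subst this
  exact Int.add_mul_fmod_self_left b p q

lemma pvmod_add_left (a c p : Int) : PySem.Int.mod (PySem.Int.mod a p + c) p = PySem.Int.mod (a + c) p := by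
  refine pvmod_congr ?_
  have : (PySem.Int.mod a p + c) - (a + c) = PySem.Int.mod a p - a := by ring
  rw [this]; exact pvdvd_mod_sub a p

lemma pv_sum_dvd {α : Type} (p : Int) (l : List α) (f g : α → Int)
    (h : ∀ x ∈ l, p ∣ f x - g x) : p ∣ ((l.map f).sum - (l.map g).sum) := by
  induction l with
  | nil => simp
  | cons x xs ih =>
    have h1 := h x (List.mem_cons_self)
    have h2 := ih (fun y hy => h y (List.mem_cons_of_mem _ hy))
    have : ((List.map f (x :: xs)).sum - (List.map g (x :: xs)).sum)
        = (f x - g x) + ((xs.map f).sum - (xs.map g).sum) := by simp; ring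
    rw [this]; exact dvd_add h1 h2

lemma pv_sum_single (K : List Int) (hnd : K.Nodup) (a : Int) (ha : a ∈ K) (h : Int → Int) :
    (K.map (fun k => if k = a then h k else 0)).sum = h a := by
  induction K with
  | nil => cases ha
  | cons x xs ih =>
    rcases List.mem_cons.mp ha with rfl | hmem
    · have hnx : a ∉ xs := (List.nodup_cons.mp hnd).1
      have : (xs.map (fun k => if k = a then h k else 0)).sum = 0 := by
        apply List.sum_eq_zero
        intro y hy
        obtain ⟨k, hk, hke⟩ := List.mem_map.mp hy
        rw [← hke, if_neg (by rintro rfl; exact hnx hk)]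
      rw [List.map_cons, List.sum_cons, if_pos rfl, this, add_zero]
    · have hxa : x ≠ a := by rintro rfl; exact (List.nodup_cons.mp hnd).1 hmem
      simp only [List.map_cons, List.sum_cons, if_neg hxa, zero_add]
      exact ih (List.nodup_cons.mp hnd).2 hmem

lemma pv_sum_swap {α β : Type} (X : List α) (Y : List β) (F : α → β → Int) :
    (X.map (fun x => (Y.map (F x)).sum)).sum = (Y.map (fun y => (X.map (fun x => F x y)).sum)).sum := by
  induction X with
  | nil => simp
  | cons x xs ih =>
    simp only [List.map_cons, List.sum_cons, ih]
    rw [← PySem.List.sum_map_add_int]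

-- the inner fold of a round, over any pair list, starting from a mod-reduced accumulator
lemma pv_foldI (p r : Int) (l : List (Int × Int)) :
    ∀ (acc : PySem.Dict Int Int), acc.keys.Nodup →
      (∀ j, acc.getD j 0 = PySem.Int.mod (acc.getD j 0) p) →
      (∀ j, (l.foldl (pvStepI p r) acc).getD j 0
          = PySem.Int.mod (acc.getD j 0 + (l.map (fun (kv : Int × Int) => if kv.1 >>> (1 : Nat) = j then kv.2 * pvG r kv.1 else 0)).sum) p)
      ∧ (l.foldl (pvStepI p r) acc).keys.Nodup
      ∧ (∀ x, x ∈ (l.foldl (pvStepI p r) acc).keys ↔ x ∈ acc.keys ∨ ∃ kv ∈ l, kv.1 >>> (1 : Nat) = x) := by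
  induction l with
  | nil =>
    intro acc hnd hred
    refine ⟨fun j => ?_, hnd, fun x => by simp⟩
    simp only [List.foldl_nil, List.map_nil, List.sum_nil, add_zero]
    exact hred j
  | cons kv rest ih =>
    intro acc hnd hred
    set key := kv.1 >>> (1 : Nat) with hkey
    set acc1 := pvStepI p r acc kv with hacc1
    have hgd1 : ∀ j, acc1.getD j 0
        = if j = key then PySem.Int.mod (acc.getD key 0 + kv.2 * pvG r kv.1) p else acc.getD j 0 := by
      intro j; rw [hacc1]; exact PySem.Dict.getD_insert _ _ _ _ _
    have hnd1 : acc1.keys.Nodup := PySem.Dict.nodup_keys_insert _ _ _ hnd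
    have hred1 : ∀ j, acc1.getD j 0 = PySem.Int.mod (acc1.getD j 0) p := by
      intro j; rw [hgd1 j]
      split
      · rw [pvmod_idem]
      · exact hred j
    obtain ⟨ihv, ihnd, ihmem⟩ := ih acc1 hnd1 hred1
    refine ⟨fun j => ?_, ihnd, fun x => ?_⟩
    · rw [List.foldl_cons, ← hacc1, ihv j, hgd1 j]
      simp only [List.map_cons, List.sum_cons]
      by_cases hj : j = key
      · subst hj
        rw [if_pos rfl, if_pos hkey.symm, pvmod_add_left]
        ring_nf
      · rw [if_neg hj, if_neg (fun h => hj (by rw [← h]))]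
        ring_nf
    · rw [List.foldl_cons, ← hacc1]
      rw [ihmem x]
      constructor
      · rintro (hx | ⟨kv', hkv', hx⟩)
        · rw [hacc1] at hx
          rcases (PySem.Dict.mem_keys_insert _ _ _ _).mp hx with rfl | hx
          · exact Or.inr ⟨kv, List.mem_cons_self, rfl⟩
          · exact Or.inl hx
        · exact Or.inr ⟨kv', List.mem_cons_of_mem _ hkv', hx⟩
      · rintro (hx | ⟨kv', hkv', hx⟩)
        · exact Or.inl (by rw [hacc1]; exact (PySem.Dict.mem_keys_insert _ _ _ _).mpr (Or.inr hx))
        · rcases List.mem_cons.mp hkv' with rfl | hmem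
          · exact Or.inl (by rw [hacc1, ← hx]; exact (PySem.Dict.mem_keys_insert _ _ _ _).mpr (Or.inl rfl))
          · exact Or.inr ⟨kv', hmem, hx⟩

-- on the items of a nodup-keyed dict, A's literal step is pvStepI
lemma pv_step_eq (p r : Int) (d : PySem.Dict Int Int) (hnd : d.keys.Nodup) :
    ∀ (acc : PySem.Dict Int Int), ∀ kv ∈ d.items, pvStepInner p r d acc kv = pvStepI p r acc kv := by
  rintro acc ⟨k, v⟩ hkv
  have hget : d.getD k 0 = v := PySem.Dict.getD_of_mem_items d hkv hnd 0
  unfold pvStepInner pvStepI pvG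
  simp only [hget]
  by_cases hc : acc.contains (k >>> (1 : Nat)) = true
  · simp only [hc, if_true]
    by_cases hb : (PySem.Int.band k 1 == 0) = true
    · simp [hb]
    · simp [hb]
  · have hc' : acc.contains (k >>> (1 : Nat)) = false := by
      cases h : acc.contains (k >>> (1 : Nat)) with
      | true => exact absurd h hc
      | false => rfl
    have hz : acc.getD (k >>> (1 : Nat)) 0 = 0 := PySem.Dict.getD_of_not_contains acc 0 hc'
    simp only [hc', Bool.false_eq_true, if_false]
    by_cases hb : (PySem.Int.band k 1 == 0) = true
    · simp [hb, PySem.Dict.insert_insert_self, hz]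
    · simp [hb, PySem.Dict.insert_insert_self, hz]

lemma pv_round_spec (p r : Int) (d : PySem.Dict Int Int) (hnd : d.keys.Nodup) :
    (∀ j, (pvRoundA p r d).getD j 0
        = PySem.Int.mod ((d.items.map (fun (kv : Int × Int) => if kv.1 >>> (1 : Nat) = j then kv.2 * pvG r kv.1 else 0)).sum) p)
    ∧ (pvRoundA p r d).keys.Nodup
    ∧ (∀ x, x ∈ (pvRoundA p r d).keys ↔ ∃ kv ∈ d.items, kv.1 >>> (1 : Nat) = x) := by
  have hrw : pvRoundA p r d = d.items.foldl (pvStepI p r) PySem.Dict.empty := by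
    unfold pvRoundA
    exact PySem.List.foldl_congr_mem _ _ _ _ (pv_step_eq p r d hnd)
  have hred : ∀ j, (PySem.Dict.empty : PySem.Dict Int Int).getD j 0
      = PySem.Int.mod ((PySem.Dict.empty : PySem.Dict Int Int).getD j 0) p := by
    intro j
    rw [PySem.Dict.getD_empty]
    exact (Int.zero_fmod p).symm
  obtain ⟨hv, hn, hm⟩ := pv_foldI p r d.items PySem.Dict.empty PySem.Dict.nodup_keys_empty hred
  rw [hrw]
  refine ⟨fun j => ?_, hn, fun x => ?_⟩
  · rw [hv j, PySem.Dict.getD_empty, zero_add]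
  · rw [hm x, PySem.Dict.keys_empty]
    simp

lemma pvW_succ (args : List Int) (t : Nat) (k : Int) :
    pvW args (t + 1) k = pvW args t k * pvG (args.getD t 0) (k >>> t) := by
  unfold pvW
  rw [List.range_succ, List.map_append, List.prod_append]
  simp

-- regrouping: summing each level-t fiber value times its branch factor over the distinct
-- t-shifted keys gives the level-(t+1) fiber value
lemma pv_regroup (items : List (Int × Int)) (args : List Int) (t : Nat) (K : List Int)
    (hnd : K.Nodup) (hmem : ∀ x, x ∈ K ↔ ∃ kv ∈ items, kv.1 >>> t = x) (j : Int) :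
    (K.map (fun (k' : Int) => if k' >>> (1 : Nat) = j then pvV items args t k' * pvG (args.getD t 0) k' else 0)).sum
      = pvV items args (t + 1) j := by
  have hterm : ∀ k' : Int, (if k' >>> (1 : Nat) = j then pvV items args t k' * pvG (args.getD t 0) k' else 0)
      = (items.map (fun (kv : Int × Int) => if k' >>> (1 : Nat) = j ∧ kv.1 >>> t = k'
            then kv.2 * pvW args t kv.1 * pvG (args.getD t 0) k' else 0)).sum := by
    intro k'
    by_cases hc : k' >>> (1 : Nat) = j
    · rw [if_pos hc]
      unfold pvV
      rw [← List.sum_map_mul_right]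
      congr 1
      apply List.map_congr_left
      intro kv _
      by_cases hk : kv.1 >>> t = k'
      · rw [if_pos hk, if_pos ⟨hc, hk⟩]
      · rw [if_neg hk, if_neg (fun h => hk h.2), zero_mul]
    · rw [if_neg hc]
      symm
      apply List.sum_eq_zero
      intro y hy
      obtain ⟨kv, _, hke⟩ := List.mem_map.mp hy
      rw [← hke, if_neg (fun h => hc h.1)]
  calc (K.map (fun (k' : Int) => if k' >>> (1 : Nat) = j then pvV items args t k' * pvG (args.getD t 0) k' else 0)).sum
      = (K.map (fun (k' : Int) => (items.map (fun (kv : Int × Int) => if k' >>> (1 : Nat) = j ∧ kv.1 >>> t = k'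
            then kv.2 * pvW args t kv.1 * pvG (args.getD t 0) k' else 0)).sum)).sum := by
        apply congrArg
        exact List.map_congr_left (fun k' _ => hterm k')
    _ = (items.map (fun (kv : Int × Int) => (K.map (fun (k' : Int) => if k' >>> (1 : Nat) = j ∧ kv.1 >>> t = k'
            then kv.2 * pvW args t kv.1 * pvG (args.getD t 0) k' else 0)).sum)).sum :=
        pv_sum_swap K items _
    _ = pvV items args (t + 1) j := by
        unfold pvV
        apply congrArg
        apply List.map_congr_left
        intro kv hkv
        have hin : kv.1 >>> t ∈ K := (hmem _).mpr ⟨kv, hkv, rfl⟩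
        have hrw : ∀ k' : Int, (if k' >>> (1 : Nat) = j ∧ kv.1 >>> t = k'
              then kv.2 * pvW args t kv.1 * pvG (args.getD t 0) k' else 0)
            = (if k' = kv.1 >>> t
              then (if k' >>> (1 : Nat) = j then kv.2 * pvW args t kv.1 * pvG (args.getD t 0) k' else 0) else 0) := by
          intro k'
          by_cases he : k' = kv.1 >>> t
          · rw [he]
            by_cases hc : (kv.1 >>> t) >>> (1 : Nat) = j
            · rw [if_pos ⟨hc, rfl⟩, if_pos rfl, if_pos hc]
            · rw [if_neg (fun h => hc h.1), if_pos rfl, if_neg hc]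
          · rw [if_neg (fun h => he h.2.symm), if_neg he]
        calc (K.map (fun (k' : Int) => if k' >>> (1 : Nat) = j ∧ kv.1 >>> t = k'
                then kv.2 * pvW args t kv.1 * pvG (args.getD t 0) k' else 0)).sum
            = (K.map (fun (k' : Int) => if k' = kv.1 >>> t
                then (if k' >>> (1 : Nat) = j then kv.2 * pvW args t kv.1 * pvG (args.getD t 0) k' else 0) else 0)).sum := by
              apply congrArg; exact List.map_congr_left (fun k' _ => hrw k')
          _ = (if (kv.1 >>> t) >>> (1 : Nat) = j then kv.2 * pvW args t kv.1 * pvG (args.getD t 0) (kv.1 >>> t) else 0) :=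
              pv_sum_single K hnd _ hin _
          _ = (if kv.1 >>> (t + 1) = j then kv.2 * pvW args (t + 1) kv.1 else 0) := by
              rw [pv_shr_shr, pvW_succ]
              split <;> ring
  -- end calc

-- main invariant of A's outer loop
lemma pv_main (data : List (Int × Int)) (args : List Int) (p : Int) :
    ∀ t, t ≤ args.length →
      ((List.range t).foldl (fun dp i => pvRoundA p (args.getD i 0) dp) (PySem.Dict.ofList data)).keys.Nodup
      ∧ (∀ x, x ∈ ((List.range t).foldl (fun dp i => pvRoundA p (args.getD i 0) dp) (PySem.Dict.ofList data)).keys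
            ↔ ∃ kv ∈ (PySem.Dict.ofList data).items, kv.1 >>> t = x)
      ∧ (1 ≤ t → ∀ j, ((List.range t).foldl (fun dp i => pvRoundA p (args.getD i 0) dp) (PySem.Dict.ofList data)).getD j 0
            = PySem.Int.mod (pvV (PySem.Dict.ofList data).items args t j) p) := by
  intro t
  induction t with
  | zero =>
    intro _
    refine ⟨PySem.Dict.nodup_keys_ofList data, fun x => ?_, fun h => absurd h (by omega)⟩
    simp only [List.range_zero, List.foldl_nil]
    constructor
    · intro hx
      obtain ⟨kv, hkv, hke⟩ := List.mem_map.mp hx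
      exact ⟨kv, hkv, by rw [pv_shr_zero, hke]⟩
    · rintro ⟨kv, hkv, hke⟩
      rw [← hke, pv_shr_zero]
      exact List.mem_map.mpr ⟨kv, hkv, rfl⟩
  | succ t ih =>
    intro ht
    have ht' : t ≤ args.length := by omega
    obtain ⟨hnd, hmem, hval⟩ := ih ht'
    set dpt := (List.range t).foldl (fun dp i => pvRoundA p (args.getD i 0) dp) (PySem.Dict.ofList data) with hdpt
    have hfold : (List.range (t + 1)).foldl (fun dp i => pvRoundA p (args.getD i 0) dp) (PySem.Dict.ofList data)
        = pvRoundA p (args.getD t 0) dpt := by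
      rw [List.range_succ, List.foldl_append, List.foldl_cons, List.foldl_nil]
    obtain ⟨rv, rn, rm⟩ := pv_round_spec p (args.getD t 0) dpt hnd
    rw [hfold]
    refine ⟨rn, fun x => ?_, fun _ j => ?_⟩
    · rw [rm x]
      constructor
      · rintro ⟨kv, hkv, hke⟩
        have hk : kv.1 ∈ dpt.keys := PySem.Dict.mem_keys_of_mem_items _ hkv
        obtain ⟨kv0, hkv0, hke0⟩ := (hmem kv.1).mp hk
        exact ⟨kv0, hkv0, by rw [← pv_shr_shr, hke0, hke]⟩
      · rintro ⟨kv0, hkv0, hke0⟩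
        have hk : kv0.1 >>> t ∈ dpt.keys := (hmem _).mpr ⟨kv0, hkv0, rfl⟩
        obtain ⟨kv, hkv, hke⟩ := List.mem_map.mp hk
        exact ⟨kv, hkv, by rw [hke, pv_shr_shr, hke0]⟩
    · rw [rv j]
      have hitems : dpt.items = dpt.keys.map (fun k => (k, dpt.getD k 0)) :=
        PySem.Dict.items_eq_map_keys dpt hnd 0
      rcases Nat.eq_zero_or_pos t with rfl | htpos
      · -- first round: values are the original ones, no mod yet
        have hdp0 : dpt = PySem.Dict.ofList data := by rw [hdpt]; simp
        apply congrArg (fun s => PySem.Int.mod s p)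
        rw [hdp0]
        unfold pvV
        apply congrArg
        apply List.map_congr_left
        intro kv _
        have hw : pvW args 1 kv.1 = pvG (args.getD 0 0) kv.1 := by
          unfold pvW
          simp
        rw [hw]
      · -- later rounds: replace stored values by their mod-characterisation, then regroup
        have h1t : 1 ≤ t := htpos
        rw [hitems, List.map_map]
        have hcong : ∀ k' ∈ dpt.keys,
            ((fun (kv : Int × Int) => if kv.1 >>> (1 : Nat) = j then kv.2 * pvG (args.getD t 0) kv.1 else 0) ∘
              (fun k => (k, dpt.getD k 0))) k'
            = (fun (k' : Int) => if k' >>> (1 : Nat) = j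
                then PySem.Int.mod (pvV (PySem.Dict.ofList data).items args t k') p * pvG (args.getD t 0) k' else 0) k' := by
          intro k' _
          simp only [Function.comp]
          rw [hval h1t k']
        rw [List.map_congr_left hcong]
        have hdvd : p ∣ ((dpt.keys.map (fun (k' : Int) => if k' >>> (1 : Nat) = j
              then PySem.Int.mod (pvV (PySem.Dict.ofList data).items args t k') p * pvG (args.getD t 0) k' else 0)).sum
            - (dpt.keys.map (fun (k' : Int) => if k' >>> (1 : Nat) = j
              then pvV (PySem.Dict.ofList data).items args t k' * pvG (args.getD t 0) k' else 0)).sum) := by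
          apply pv_sum_dvd
          intro k' _
          by_cases hc : k' >>> (1 : Nat) = j
          · rw [if_pos hc, if_pos hc, ← sub_mul]
            exact Dvd.dvd.mul_right (pvdvd_mod_sub _ p) _
          · rw [if_neg hc, if_neg hc, sub_zero]
            exact dvd_zero p
        rw [pvmod_congr hdvd,
          pv_regroup (PySem.Dict.ofList data).items args t dpt.keys hnd hmem j]

-- B's branch factor is A's branch factor of the shifted key
lemma pvW_eq_prod (args : List Int) (L : Nat) (k : Int) :
    pvW args L k = ((List.range L).map (fun (i : Nat) =>
        if PySem.Int.band (k >>> i) 1 != 0 then args.getD i 0 else 1 - args.getD i 0)).prod := by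
  unfold pvW
  apply congrArg
  apply List.map_congr_left
  intro i _
  unfold pvG
  by_cases hb : (PySem.Int.band (k >>> i) 1 == 0) = true
  · rw [if_pos hb]
    have : (PySem.Int.band (k >>> i) 1 != 0) = false := by
      simp only [bne]; rw [hb]; rfl
    rw [this]; rfl
  · rw [if_neg hb]
    have hb' : (PySem.Int.band (k >>> i) 1 == 0) = false := by
      cases h : (PySem.Int.band (k >>> i) 1 == 0) with
      | true => exact absurd h hb
      | false => rfl
    have : (PySem.Int.band (k >>> i) 1 != 0) = true := by
      simp only [bne]; rw [hb']; rfl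
    rw [this]; rfl

-- B's inner fold is congruent mod p to v times the factor product
lemma pv_foldl_mulmod (p : Int) (l : List Nat) (f : Nat → Int) :
    ∀ v : Int, p ∣ (l.foldl (fun (term : Int) (i : Nat) => PySem.Int.mod (term * f i) p) v
      - v * (l.map f).prod) := by
  induction l with
  | nil => intro v; simp
  | cons x xs ih =>
    intro v
    simp only [List.foldl_cons, List.map_cons, List.prod_cons]
    have h1 := ih (PySem.Int.mod (v * f x) p)
    have h2 : p ∣ (PySem.Int.mod (v * f x) p - v * f x) := pvdvd_mod_sub _ p
    have hsplit : xs.foldl (fun (term : Int) (i : Nat) => PySem.Int.mod (term * f i) p) (PySem.Int.mod (v * f x) p)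
          - v * (f x * (xs.map f).prod)
        = (xs.foldl (fun (term : Int) (i : Nat) => PySem.Int.mod (term * f i) p) (PySem.Int.mod (v * f x) p)
            - PySem.Int.mod (v * f x) p * (xs.map f).prod)
          + (PySem.Int.mod (v * f x) p - v * f x) * (xs.map f).prod := by ring
    rw [hsplit]
    exact dvd_add h1 (Dvd.dvd.mul_right h2 _)

-- mathematical value of B's suffix list: pvS m = prod of (1 - args[L-1-t]) for t < m, reduced stepwise
def pvS (args : List Int) (p : Int) (L : Nat) : Nat → Int
  | 0 => 1
  | m + 1 => PySem.Int.mod (pvS args p L m * (1 - args.getD (L - 1 - m) 0)) p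

def pvT (args : List Int) (L m : Nat) : Int :=
  ((List.range m).map (fun t => 1 - args.getD (L - 1 - t) 0)).prod

lemma pv_suffix_spec (args : List Int) (p : Int) (L : Nat) : ∀ M : Nat,
    (List.range M).foldl (pvSuffixStep args p L) ([1], 1)
      = ((List.range (M + 1)).map (pvS args p L), pvS args p L M) := by
  intro M
  induction M with
  | zero => rfl
  | succ M ih =>
    rw [List.range_succ, List.foldl_append, List.foldl_cons, List.foldl_nil, ih]
    unfold pvSuffixStep
    dsimp only
    rw [List.range_succ (n := M + 1), List.map_append]
    rfl

lemma pv_S_congr (args : List Int) (p : Int) (L : Nat) : ∀ m : Nat,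
    p ∣ (pvS args p L m - pvT args L m) := by
  intro m
  induction m with
  | zero => simp [pvS, pvT]
  | succ m ih =>
    have hT : pvT args L (m + 1) = pvT args L m * (1 - args.getD (L - 1 - m) 0) := by
      unfold pvT
      rw [List.range_succ, List.map_append, List.prod_append]
      simp
    have hsplit : pvS args p L (m + 1) - pvT args L (m + 1)
        = (PySem.Int.mod (pvS args p L m * (1 - args.getD (L - 1 - m) 0)) p
            - pvS args p L m * (1 - args.getD (L - 1 - m) 0))
          + (pvS args p L m - pvT args L m) * (1 - args.getD (L - 1 - m) 0) := by
      have hS1 : pvS args p L (m + 1)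
          = PySem.Int.mod (pvS args p L m * (1 - args.getD (L - 1 - m) 0)) p := rfl
      rw [hS1, hT]; ring
    rw [hsplit]
    exact dvd_add (pvdvd_mod_sub _ p) (Dvd.dvd.mul_right ih _)

lemma pv_prod_reverse (m : Nat) (h : Nat → Int) :
    ((List.range m).map (fun t => h (m - 1 - t))).prod = ((List.range m).map h).prod := by
  induction m generalizing h with
  | zero => rfl
  | succ m ih =>
    have hRHS : ((List.range (m + 1)).map h).prod = ((List.range m).map h).prod * h m := by
      rw [List.range_succ, List.map_append, List.prod_append]; simp
    have hfn : ((fun t => h (m + 1 - 1 - t)) ∘ Nat.succ) = (fun t => h (m - 1 - t)) := by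
      funext t
      have harg : m + 1 - 1 - Nat.succ t = m - 1 - t := by omega
      simp only [Function.comp]
      rw [harg]
    conv_lhs => rw [List.range_succ_eq_map]
    rw [List.map_cons, List.map_map, List.prod_cons, hfn, ih h, hRHS]
    have h0 : m + 1 - 1 - 0 = m := by omega
    rw [h0, mul_comm]

lemma pv_shr_bounds (k : Int) (L : Nat) (h : k >>> L = 0) : 0 ≤ k ∧ k.natAbs < 2 ^ L := by
  rw [Int.shiftRight_eq_div_pow] at h
  have hpos : (0 : Int) < ((2 ^ L : Nat) : Int) := by positivity
  have hdm := Int.mul_ediv_add_emod k ((2 ^ L : Nat) : Int)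
  rw [h, mul_zero, zero_add] at hdm
  have h1 := Int.emod_nonneg k (ne_of_gt hpos)
  have h2 := Int.emod_lt_of_pos k hpos
  constructor <;> omega

lemma pv_bl_le (k : Int) (L : Nat) (hna : k.natAbs < 2 ^ L) : PySem.Int.bitLength k ≤ L := by
  by_cases hk : k = 0
  · subst hk; simp [PySem.Int.bitLength_zero]
  · have hlow := PySem.Int.two_pow_bitLength_le k hk
    by_contra hgt
    rw [not_le] at hgt
    have : (2 : Nat) ^ L ≤ 2 ^ (PySem.Int.bitLength k - 1) :=
      Nat.pow_le_pow_right (by norm_num) (by omega)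
    omega

lemma pv_high_zero (k : Int) (i : Nat) (hk : 0 ≤ k) (hi : PySem.Int.bitLength k ≤ i) :
    k >>> i = 0 := by
  have hlt : k.natAbs < 2 ^ i :=
    lt_of_lt_of_le (PySem.Int.lt_two_pow_bitLength k) (Nat.pow_le_pow_right (by norm_num) hi)
  rw [Int.shiftRight_eq_div_pow]
  apply Int.ediv_eq_zero_of_lt hk
  omega

lemma pvW_split (args : List Int) (L b : Nat) (k : Int) (hb : b ≤ L)
    (hz : ∀ i : Nat, b ≤ i → k >>> i = 0) :
    pvW args L k = pvW args b k * pvT args L (L - b) := by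
  unfold pvW
  conv_lhs => rw [show L = b + (L - b) by omega]
  rw [List.range_add, List.map_append, List.prod_append, List.map_map]
  congr 1
  have hstep : ∀ t : Nat, (((fun i => pvG (args.getD i 0) (k >>> i)) ∘ (fun x => b + x)) t)
      = 1 - args.getD (b + t) 0 := by
    intro t
    simp only [Function.comp]
    rw [hz (b + t) (by omega)]
    unfold pvG
    have hband : PySem.Int.band (0 : Int) 1 = 0 := by decide
    rw [hband]
    rfl
  rw [List.map_congr_left (fun t _ => hstep t)]
  have hrev := pv_prod_reverse (L - b) (fun t => 1 - args.getD (b + t) 0)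
  unfold pvT
  rw [← hrev]
  apply congrArg
  apply List.map_congr_left
  intro t ht
  have htlt : t < L - b := List.mem_range.mp ht
  congr 2
  omega

-- B's outer fold is the sum of per-entry contributions
lemma pv_foldl_if_add {α : Type} (l : List α) (c : α → Prop) [DecidablePred c] (h : α → Int) :
    ∀ acc : Int, l.foldl (fun acc kv => if c kv then acc else acc + h kv) acc
      = acc + (l.map (fun kv => if c kv then 0 else h kv)).sum := by
  induction l with
  | nil => intro acc; simp
  | cons x xs ih =>
    intro acc
    simp only [List.foldl_cons, List.map_cons, List.sum_cons, ih]
    by_cases hc : c x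
    · rw [if_pos hc, if_pos hc]; ring
    · rw [if_neg hc, if_neg hc]; ring

-- the empty dict is a fixed point of the outer loop
lemma pv_rounds_empty (args : List Int) (p : Int) (t : Nat) :
    (List.range t).foldl (fun dp i => pvRoundA p (args.getD i 0) dp) (PySem.Dict.ofList ([] : List (Int × Int)))
      = PySem.Dict.ofList ([] : List (Int × Int)) := by
  induction t with
  | zero => simp
  | succ t ih =>
    rw [List.range_succ, List.foldl_append, ih, List.foldl_cons, List.foldl_nil]
    rfl

-- ===== VERDICT (by name: the statement is the Claim_ definition above) =====
theorem evaluate_sparse_spec : Claim_equal_evaluate_sparse := by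
  intro data args p _ _
  unfold Spec_evaluate_sparse evaluate_sparse evaluate_sparse_alt
  dsimp only
  by_cases hE : data.isEmpty
  · -- empty data: A's dict stays empty, both return 0
    have hnil : data = [] := List.isEmpty_iff.mp hE
    subst hnil
    rw [if_pos hE]
    simp only [pv_rounds_empty]
    rfl
  · rw [if_neg hE]
    by_cases hL : args.length = 0
    · -- no arguments: A returns dp0.get(0) directly, B returns data.get(0, 0)
      rw [if_pos hL, hL]
      simp only [List.range_zero, List.foldl_nil]
      rw [PySem.Dict.getD_eq_get?_getD]
      cases (PySem.Dict.ofList data).get? 0 <;> rfl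
    · rw [if_neg hL]
      have hL1 : 1 ≤ args.length := by omega
      obtain ⟨_, _, hval⟩ := pv_main data args p args.length (le_refl _)
      have hA : (match ((List.range args.length).foldl (fun dp i => pvRoundA p (args.getD i 0) dp)
            (PySem.Dict.ofList data)).get? 0 with | none => 0 | some v => v)
          = ((List.range args.length).foldl (fun dp i => pvRoundA p (args.getD i 0) dp)
            (PySem.Dict.ofList data)).getD 0 0 := by
        rw [PySem.Dict.getD_eq_get?_getD]
        cases ((List.range args.length).foldl (fun dp i => pvRoundA p (args.getD i 0) dp)
            (PySem.Dict.ofList data)).get? 0 <;> rfl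
      rw [hA, hval hL1 0]
      rw [pv_suffix_spec args p args.length args.length]
      dsimp only
      rw [pv_foldl_if_add _ _ _ 0, zero_add]
      apply pvmod_congr
      unfold pvV
      apply pv_sum_dvd
      intro kv _
      by_cases hc : kv.1 >>> args.length = 0
      · rw [if_pos hc, if_neg (by simp [hc])]
        obtain ⟨hk0, hklt⟩ := pv_shr_bounds kv.1 args.length hc
        have hble : PySem.Int.bitLength kv.1 ≤ args.length := pv_bl_le kv.1 args.length hklt
        rw [PySem.List.getD_map_range _ _ _ _ (by omega)]
        have hWsplit := pvW_split args args.length (PySem.Int.bitLength kv.1) kv.1 hble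
          (fun i hi => pv_high_zero kv.1 i hk0 hi)
        have hX := pv_foldl_mulmod p (List.range (PySem.Int.bitLength kv.1))
          (fun i => if PySem.Int.band (kv.1 >>> i) 1 != 0 then args.getD i 0 else 1 - args.getD i 0) kv.2
        rw [← pvW_eq_prod args (PySem.Int.bitLength kv.1) kv.1] at hX
        have hS := pv_S_congr args p args.length (args.length - PySem.Int.bitLength kv.1)
        set X := (List.range (PySem.Int.bitLength kv.1)).foldl
          (fun (term : Int) (i : Nat) => PySem.Int.mod (term * (if PySem.Int.band (kv.1 >>> i) 1 != 0 then args.getD i 0 else 1 - args.getD i 0)) p) kv.2 with hXdef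
        set S := pvS args p args.length (args.length - PySem.Int.bitLength kv.1) with hSdef
        set T := pvT args args.length (args.length - PySem.Int.bitLength kv.1) with hTdef
        have hid : kv.2 * pvW args args.length kv.1 - X * S
            = (kv.2 * pvW args (PySem.Int.bitLength kv.1) kv.1) * (T - S)
              + (kv.2 * pvW args (PySem.Int.bitLength kv.1) kv.1 - X) * S := by
          rw [hWsplit]; ring
        rw [hid]
        exact dvd_add (Dvd.dvd.mul_left (dvd_sub_comm.mp hS) _)
          (Dvd.dvd.mul_right (dvd_sub_comm.mp hX) _)
      · rw [if_neg hc, if_pos (by simp [hc]), sub_zero]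
        exact dvd_zero p
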